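-- pv_equiv track=rewrite | github.com/minoLMW/CodingTest | CodingTest3.py | solution
-- ===== SOURCE A (Python) =====
-- def solution(original_edges, compare_edges):
--     # original_edges, compare_edges: [(parent, child), ...] 형태라고 가정
--
--     def build_parent_map(edges):
--         parent = {}
--         nodes = set()
--         for p, c in edges:
--             parent[c] = p
--             nodes.add(p)
--             nodes.add(c)
--         return parent, nodes
--
--     p1, nodes1 = build_parent_map(original_edges)
--     p2, nodes2 = build_parent_map(compare_edges)
--     all_nodes = nodes1 | nodes2  # 동일 ID라고 했지만 안전하게 합집합
--
--     def build_path_func(parent_map):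
--         memo = {}  # node -> tuple(path from root to node)
--
--         def get_path(x):
--             if x in memo:
--                 return memo[x]
--
--             stack = []
--             cur = x
--             # 아직 경로가 계산되지 않은 노드들을 스택에 쌓고 위로 올라감
--             while cur is not None and cur not in memo:
--                 stack.append(cur)
--                 cur = parent_map.get(cur)  # 루트면 None
--
--             # cur가 None(루트 위)거나 memo에 있는 노드
--             base = memo[cur] if cur in memo else ()
--             # base는 (root..cur) 경로, stack을 아래에서부터 붙임
--             path = base
--             for node in reversed(stack):
--                 path = path + (node,)
--                 memo[node] = path
--             return memo[x]
--
--         return get_path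
--
--     path1 = build_path_func(p1)
--     path2 = build_path_func(p2)
--
--     diff = []
--     for node in all_nodes:
--         if path1(node) != path2(node):
--             diff.append(node)
--
--     diff.sort()
--     return diff
-- ===== SOURCE B (Python) =====
-- def solution(original_edges, compare_edges):
--     # Re-implementation: instead of building and comparing full root-to-node paths,
--     # observe that node x has the same path in both trees iff its parent pointer is
--     # identical in both trees and its parent (if any) has the same path.  So the
--     # "different" nodes are exactly the closure of {x : parent1(x) != parent2(x)}
--     # under the child links of tree 1 (a child whose parents agree inherits its
--     # parent's status).  One top-down propagation, no path tuples at all.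
--     p1 = {c: p for p, c in original_edges}
--     p2 = {c: p for p, c in compare_edges}
--     nodes = {x for p, c in original_edges + compare_edges for x in (p, c)}
--     children = {}
--     for c, p in p1.items():
--         children.setdefault(p, []).append(c)
--     bad = {x for x in nodes if p1.get(x) != p2.get(x)}
--     order = list(bad)
--     i = 0
--     while i < len(order):
--         y = order[i]
--         i += 1
--         for c in children.get(y, ()):
--             if c not in bad:  # parents of c agree, parent is bad -> c is bad
--                 bad.add(c)
--                 order.append(c)
--     return sorted(bad)
-- ===== Notes on version B (the rewrite author's own statement) =====
-- stated objective: alternative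
-- what changed: Instead of materialising and comparing the full root-to-node path tuple for every node, B marks the nodes whose parent pointers differ in the two trees and propagates that boolean down tree 1's child links in one top-down pass, so no path tuples are built or compared at all.
-- outside the precondition, e.g. on solution([(1, 1)], []): A does not finish within the time limit, B returns [1]
import Mathlib
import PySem

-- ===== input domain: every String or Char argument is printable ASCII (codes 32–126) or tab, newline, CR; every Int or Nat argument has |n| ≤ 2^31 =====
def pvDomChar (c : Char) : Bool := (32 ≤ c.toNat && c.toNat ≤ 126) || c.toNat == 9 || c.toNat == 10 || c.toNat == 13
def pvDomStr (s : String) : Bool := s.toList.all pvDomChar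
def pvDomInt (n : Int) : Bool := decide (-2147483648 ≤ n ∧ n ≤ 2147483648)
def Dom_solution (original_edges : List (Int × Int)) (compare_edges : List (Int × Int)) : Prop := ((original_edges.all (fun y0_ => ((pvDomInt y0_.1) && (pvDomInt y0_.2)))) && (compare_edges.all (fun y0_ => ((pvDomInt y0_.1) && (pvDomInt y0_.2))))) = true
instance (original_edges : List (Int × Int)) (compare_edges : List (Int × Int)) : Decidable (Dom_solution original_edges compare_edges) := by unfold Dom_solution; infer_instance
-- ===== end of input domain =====

-- B replaces A's build-and-compare of full root-to-node path tuples by a single top-down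
-- propagation of a boolean "path differs" marker through tree 1's child links (objective: alternative).

-- ===== PORT A =====
-- build_parent_map(edges): parent dict (child ↦ parent) and the set of all mentioned nodes
def pvBuildParent (edges : List (Int × Int)) : PySem.Dict Int Int × PySem.Set Int :=
  edges.foldl
    (fun st pc =>
      (st.1.insert pc.2 pc.1, PySem.Set.add (PySem.Set.add st.2 pc.1) pc.2))
    (PySem.Dict.empty, PySem.Set.empty)

-- the 'while cur is not None and cur not in memo' climb; fuel only makes it total
-- (under Pre_ every parent chain reaches a root within the given fuel)
def pvClimb (pm : PySem.Dict Int Int) (memo : PySem.Dict Int (List Int)) :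
    Nat → Option Int → List Int → List Int × Option Int
  | 0, cur, stack => (stack, cur)
  | f + 1, cur, stack =>
    match cur with
    | none => (stack, none)
    | some c =>
      if memo.contains c then (stack, some c)
      else pvClimb pm memo f (pm.get? c) (stack ++ [c])

-- get_path(x) with the shared memo threaded through
def pvGetPath (pm : PySem.Dict Int Int) (fuel : Nat) (memo : PySem.Dict Int (List Int))
    (x : Int) : List Int × PySem.Dict Int (List Int) :=
  match memo.get? x with
  | some p => (p, memo)
  | none =>
    let sc := pvClimb pm memo fuel (some x) []
    let base : List Int :=
      match sc.2 with
      | some c => if memo.contains c then memo.getD c [] else []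
      | none => []
    let st := sc.1.reverse.foldl
      (fun (st : List Int × PySem.Dict Int (List Int)) node =>
        (st.1 ++ [node], st.2.insert node (st.1 ++ [node])))
      (base, memo)
    (st.2.getD x [], st.2)

def solution (original_edges : List (Int × Int)) (compare_edges : List (Int × Int)) : List Int :=
  let b1 := pvBuildParent original_edges
  let b2 := pvBuildParent compare_edges
  let allNodes := PySem.Set.union b1.2 b2.2
  let st := allNodes.foldl
    (fun (st : PySem.Dict Int (List Int) × PySem.Dict Int (List Int) × List Int) node =>
      let r1 := pvGetPath b1.1 (original_edges.length + 1) st.1 node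
      let r2 := pvGetPath b2.1 (compare_edges.length + 1) st.2.1 node
      if r1.1 ≠ r2.1 then (r1.2, r2.2, st.2.2 ++ [node]) else (r1.2, r2.2, st.2.2))
    (PySem.Dict.empty, PySem.Dict.empty, [])
  PySem.List.sorted st.2.2 (fun x => x) false

-- ===== PORT B =====
-- children map of tree 1: children.setdefault(p, []).append(c) over p1.items()
def pvChildren (p1 : PySem.Dict Int Int) : PySem.Dict Int (List Int) :=
  p1.items.foldl (fun d cp => d.modify cp.2 [] (· ++ [cp.1])) PySem.Dict.empty

-- the 'while i < len(order)' propagation; the unprocessed suffix order[i:] is the first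
-- argument, appends go to its end; fuel only makes it total (each step pops one element
-- and every element enters 'order' at most once, so nodes.length + 1 steps suffice)
def pvBFS (children : PySem.Dict Int (List Int)) :
    Nat → List Int → PySem.Set Int → PySem.Set Int
  | 0, _, bad => bad
  | _ + 1, [], bad => bad
  | f + 1, y :: pend, bad =>
    let st := (children.getD y []).foldl
      (fun (st : List Int × PySem.Set Int) c =>
        if PySem.Set.contains st.2 c then st else (st.1 ++ [c], PySem.Set.add st.2 c))
      (pend, bad)
    pvBFS children f st.1 st.2

def solution_alt (original_edges : List (Int × Int)) (compare_edges : List (Int × Int)) : List Int :=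
  let p1 := PySem.Dict.ofList (original_edges.map (fun pc => (pc.2, pc.1)))
  let p2 := PySem.Dict.ofList (compare_edges.map (fun pc => (pc.2, pc.1)))
  let nodes : PySem.Set Int :=
    PySem.Set.ofList ((original_edges ++ compare_edges).flatMap (fun pc => [pc.1, pc.2]))
  let children := pvChildren p1
  let bad0 : PySem.Set Int := nodes.filter (fun x => decide (p1.get? x ≠ p2.get? x))
  let bad := pvBFS children (nodes.length + 1) bad0 bad0
  PySem.List.sorted bad (fun x => x) false

-- ===== PRECONDITION & SPEC =====
-- parent of x: the last edge (p, c) with c = x (dict insertion overwrites)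
def pvParent? (edges : List (Int × Int)) (x : Int) : Option Int :=
  (edges.reverse.find? (fun pc => pc.2 == x)).map (·.1)

-- does the chain cur, P cur, … reach a root (none) within f steps?
def pvTermF (P : Int → Option Int) : Nat → Option Int → Bool
  | 0, cur => cur == none
  | f + 1, cur =>
    match cur with
    | none => true
    | some c => pvTermF P f (P c)

def pvNodes (o c : List (Int × Int)) : List Int :=
  (o ++ c).flatMap (fun pc => [pc.1, pc.2])

-- Pre_ excludes inputs whose child→parent map has a cycle: on those Python A loops forever
-- (it never returns).  A terminating parent chain never revisits a node, so it reaches a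
-- root within (number of edges) + 1 steps; Pre_ admits every input on which A returns.
def Pre_solution (original_edges : List (Int × Int)) (compare_edges : List (Int × Int)) : Prop :=
  ∀ x ∈ pvNodes original_edges compare_edges,
    pvTermF (pvParent? original_edges) (original_edges.length + 1) (some x) = true ∧
    pvTermF (pvParent? compare_edges) (compare_edges.length + 1) (some x) = true

instance (original_edges : List (Int × Int)) (compare_edges : List (Int × Int)) :
    Decidable (Pre_solution original_edges compare_edges) := by
  unfold Pre_solution; infer_instance

def pvWitness_solution : (List (Int × Int)) × (List (Int × Int)) :=
  ([(1, 2), (1, 3)], [(1, 2), (4, 3)])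

def Spec_solution (original_edges : List (Int × Int)) (compare_edges : List (Int × Int)) (out : List Int) : Prop := out = solution_alt original_edges compare_edges
instance (original_edges : List (Int × Int)) (compare_edges : List (Int × Int)) (out : List Int) : Decidable (Spec_solution original_edges compare_edges out) := by unfold Spec_solution; infer_instance

-- ===== CLAIM (what is proved, stated in full; the proofs are below) =====
def Claim_equal_solution : Prop := ∀ (original_edges : List (Int × Int)) (compare_edges : List (Int × Int)), Dom_solution original_edges compare_edges → Pre_solution original_edges compare_edges → Spec_solution original_edges compare_edges (solution original_edges compare_edges)

-- ===== LEMMAS AND PROOFS =====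

-- the root-to-x path (fuel-bounded; stable once the chain terminates within the fuel)
def pvPath (P : Int → Option Int) : Nat → Int → List Int
  | 0, x => [x]
  | f + 1, x => (match P x with | none => [] | some a => pvPath P f a) ++ [x]

def pvPathO (P : Int → Option Int) (f : Nat) : Option Int → List Int
  | none => []
  | some c => pvPath P f c

inductive pvChain (P : Int → Option Int) : Option Int → List Int → Option Int → Prop
  | nil (c : Option Int) : pvChain P c [] c
  | cons (y : Int) (s : List Int) (c' : Option Int) :
      pvChain P (P y) s c' → pvChain P (some y) (y :: s) c'

theorem pvTermF_succ (P : Int → Option Int) (f : Nat) (cur : Option Int)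
    (h : pvTermF P f cur = true) : pvTermF P (f + 1) cur = true := by
  induction f generalizing cur with
  | zero => cases cur <;> simp_all [pvTermF]
  | succ f ih => cases cur <;> simp_all [pvTermF]

theorem pvTermF_le (P : Int → Option Int) {f g : Nat} (hfg : f ≤ g) (cur : Option Int)
    (h : pvTermF P f cur = true) : pvTermF P g cur = true := by
  induction g with
  | zero =>
    have hf0 : f = 0 := Nat.le_zero.mp hfg
    subst hf0; exact h
  | succ g ih =>
    rcases Nat.le_succ_iff.mp hfg with h' | h'
    · exact pvTermF_succ P g cur (ih h')
    · subst h'; exact h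

theorem pvPath_stable (P : Int → Option Int) (f : Nat) (x : Int)
    (h : pvTermF P f (some x) = true) : pvPath P f x = pvPath P (f + 1) x := by
  induction f generalizing x with
  | zero => simp [pvTermF] at h
  | succ f ih =>
    show (match P x with | none => [] | some a => pvPath P f a) ++ [x]
       = (match P x with | none => [] | some a => pvPath P (f + 1) a) ++ [x]
    simp only [pvTermF] at h
    cases hx : P x with
    | none => rfl
    | some a =>
      rw [hx] at h
      show pvPath P f a ++ [x] = pvPath P (f + 1) a ++ [x]
      rw [ih a h]

theorem pvPath_stable_le (P : Int → Option Int) {f g : Nat} (hfg : f ≤ g) (x : Int)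
    (h : pvTermF P f (some x) = true) : pvPath P f x = pvPath P g x := by
  induction g with
  | zero => interval_cases f; rfl
  | succ g ih =>
    rcases Nat.le_succ_iff.mp hfg with h' | h'
    · rw [ih h', pvPath_stable]
      exact pvTermF_le P h' _ h
    · subst h'; rfl

theorem pvPath_eq_append (P : Int → Option Int) (f : Nat) (x : Int) :
    ∃ q, pvPath P f x = q ++ [x] := by
  cases f with
  | zero => exact ⟨[], rfl⟩
  | succ f => exact ⟨_, rfl⟩

theorem pvPath_ne_nil (P : Int → Option Int) (f : Nat) (x : Int) : pvPath P f x ≠ [] := by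
  obtain ⟨q, hq⟩ := pvPath_eq_append P f x
  simp [hq]

theorem pvPath_unfold (P : Int → Option Int) (f : Nat) (hf : 0 < f) (x : Int)
    (h : pvTermF P f (some x) = true) :
    pvPath P f x = pvPathO P f (P x) ++ [x] := by
  obtain ⟨g, rfl⟩ : ∃ g, f = g + 1 := ⟨f - 1, by omega⟩
  simp only [pvTermF] at h
  simp only [pvPath]
  cases hx : P x with
  | none => simp [pvPathO]
  | some a =>
    rw [hx] at h
    simp only [pvPathO]
    rw [pvPath_stable_le P (Nat.le_succ g) a h]

-- path equality is: parents equal, and the (common) parent's paths equal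
theorem pvPath_eq_iff (P1 P2 : Int → Option Int) (F1 F2 : Nat) (hF1 : 0 < F1) (hF2 : 0 < F2)
    (x : Int) (h1 : pvTermF P1 F1 (some x) = true) (h2 : pvTermF P2 F2 (some x) = true) :
    (pvPath P1 F1 x = pvPath P2 F2 x ↔
      (P1 x = P2 x ∧ ∀ a, P1 x = some a → pvPath P1 F1 a = pvPath P2 F2 a)) := by
  rw [pvPath_unfold P1 F1 hF1 x h1, pvPath_unfold P2 F2 hF2 x h2]
  constructor
  · intro h
    have hpre : pvPathO P1 F1 (P1 x) = pvPathO P2 F2 (P2 x) := by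
      have := List.append_inj_left' h rfl
      exact this
    cases hx1 : P1 x with
    | none =>
      cases hx2 : P2 x with
      | none => simp
      | some b =>
        rw [hx1, hx2] at hpre
        exact absurd hpre.symm (by simpa [pvPathO] using pvPath_ne_nil P2 F2 b)
    | some a =>
      cases hx2 : P2 x with
      | none =>
        rw [hx1, hx2] at hpre
        exact absurd hpre (by simpa [pvPathO] using pvPath_ne_nil P1 F1 a)
      | some b =>
        rw [hx1, hx2] at hpre
        simp only [pvPathO] at hpre
        obtain ⟨q1, hq1⟩ := pvPath_eq_append P1 F1 a
        obtain ⟨q2, hq2⟩ := pvPath_eq_append P2 F2 b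
        have hab : a = b := by
          rw [hq1, hq2] at hpre
          have hlast := congrArg List.getLast? hpre
          simpa using hlast
        subst hab
        refine ⟨rfl, fun a' ha' => ?_⟩
        cases ha'; exact hpre
  · rintro ⟨hpx, hrec⟩
    cases hx1 : P1 x with
    | none => rw [← hpx, hx1]; simp [pvPathO]
    | some a => rw [← hpx, hx1]; simp only [pvPathO]; rw [hrec a hx1]

-- ---------- A-side ----------

def pvInvA (P : Int → Option Int) (F : Nat) (memo : PySem.Dict Int (List Int)) : Prop :=
  ∀ k v, memo.get? k = some v → pvTermF P F (some k) = true ∧ v = pvPath P F k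

theorem pvClimb_spec (pm : PySem.Dict Int Int) (memo : PySem.Dict Int (List Int)) (F : Nat)
    (hInv : pvInvA (fun z => pm.get? z) F memo) :
    ∀ f cur acc, f ≤ F → pvTermF (fun z => pm.get? z) f cur = true →
    ∃ s cur', pvClimb pm memo f cur acc = (acc ++ s, cur') ∧
      pvChain (fun z => pm.get? z) cur s cur' ∧
      (∀ y ∈ s, pvTermF (fun z => pm.get? z) F (some y) = true) ∧
      (match cur' with
       | none => True
       | some c => memo.get? c = some (pvPath (fun z => pm.get? z) F c)) := by
  intro f
  induction f with
  | zero =>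
    intro cur acc _ hterm
    have hcur : cur = none := by
      cases cur <;> simp_all [pvTermF]
    subst hcur
    exact ⟨[], none, by simp [pvClimb], pvChain.nil none, by simp, trivial⟩
  | succ f ih =>
    intro cur acc hle hterm
    cases cur with
    | none =>
      exact ⟨[], none, by simp [pvClimb], pvChain.nil none, by simp, trivial⟩
    | some c =>
      simp only [pvTermF] at hterm
      by_cases hc : memo.contains c = true
      · obtain ⟨v, hv⟩ : ∃ v, memo.get? c = some v := by
          rw [PySem.Dict.contains_eq_isSome_get?] at hc
          exact Option.isSome_iff_exists.mp hc
        refine ⟨[], some c, by simp [pvClimb, hc], pvChain.nil _, by simp, ?_⟩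
        show memo.get? c = some (pvPath (fun z => pm.get? z) F c)
        rw [hv, (hInv c v hv).2]
      · obtain ⟨s', cur', hcl, hch, hterms, hbase⟩ :=
          ih (pm.get? c) (acc ++ [c]) (Nat.le_of_succ_le hle) hterm
        refine ⟨c :: s', cur', ?_, pvChain.cons c s' cur' hch, ?_, hbase⟩
        · simp only [pvClimb, hc]
          rw [hcl, List.append_assoc]
          rfl
        · intro y hy
          rcases List.mem_cons.mp hy with rfl | hy'
          · exact pvTermF_le _ hle _ (by simpa [pvTermF] using hterm)
          · exact hterms y hy'

theorem pvWriteback_spec (pm : PySem.Dict Int Int) (F : Nat) (hF : 0 < F) :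
    ∀ (s : List Int) (cur cur' : Option Int) (memo : PySem.Dict Int (List Int)),
    pvChain (fun z => pm.get? z) cur s cur' →
    (∀ y ∈ s, pvTermF (fun z => pm.get? z) F (some y) = true) →
    pvInvA (fun z => pm.get? z) F memo →
    (s.reverse.foldl
        (fun (st : List Int × PySem.Dict Int (List Int)) node =>
          (st.1 ++ [node], st.2.insert node (st.1 ++ [node])))
        (pvPathO (fun z => pm.get? z) F cur', memo)).1
      = pvPathO (fun z => pm.get? z) F cur ∧
    pvInvA (fun z => pm.get? z) F
      (s.reverse.foldl
        (fun (st : List Int × PySem.Dict Int (List Int)) node =>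
          (st.1 ++ [node], st.2.insert node (st.1 ++ [node])))
        (pvPathO (fun z => pm.get? z) F cur', memo)).2 ∧
    (∀ y ∈ s,
      ((s.reverse.foldl
        (fun (st : List Int × PySem.Dict Int (List Int)) node =>
          (st.1 ++ [node], st.2.insert node (st.1 ++ [node])))
        (pvPathO (fun z => pm.get? z) F cur', memo)).2).get? y
        = some (pvPath (fun z => pm.get? z) F y))  := by
  intro s
  induction s with
  | nil =>
    intro cur cur' memo hch _ hInv
    cases hch
    exact ⟨rfl, hInv, by simp⟩
  | cons y t ih =>
    intro cur cur' memo hch hterms hInv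
    cases hch with
    | cons _ _ _ hch' =>
      have hty : pvTermF (fun z => pm.get? z) F (some y) = true := hterms y (by simp)
      have htt : ∀ z ∈ t, pvTermF (fun z => pm.get? z) F (some z) = true :=
        fun z hz => hterms z (List.mem_cons_of_mem _ hz)
      obtain ⟨ih1, ih2, ih3⟩ := ih (pm.get? y) cur' memo hch' htt hInv
      simp only [List.reverse_cons, List.foldl_append, List.foldl_cons, List.foldl_nil]
      set r := (t.reverse.foldl
        (fun (st : List ℤ × PySem.Dict ℤ (List ℤ)) node =>
          (st.1 ++ [node], st.2.insert node (st.1 ++ [node])))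
        (pvPathO (fun z => pm.get? z) F cur', memo)) with hr
      have hpath : r.1 ++ [y] = pvPath (fun z => pm.get? z) F y := by
        rw [ih1, ← pvPath_unfold (fun z => pm.get? z) F hF y hty]
      refine ⟨?_, ?_, ?_⟩
      · simpa [pvPathO] using hpath
      · intro k v hkv
        rw [PySem.Dict.get?_insert] at hkv
        by_cases hky : k = y
        · subst hky
          simp only [if_pos] at hkv
          cases hkv
          exact ⟨hty, hpath⟩
        · rw [if_neg hky] at hkv
          exact ih2 k v hkv
      · intro z hz
        rw [PySem.Dict.get?_insert]
        by_cases hzy : z = y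
        · subst hzy
          rw [if_pos rfl, hpath]
        · rw [if_neg hzy]
          rcases List.mem_cons.mp hz with h | h
          · exact absurd h hzy
          · exact ih3 z h

theorem pvGetPath_spec (pm : PySem.Dict Int Int) (F : Nat) (hF : 0 < F)
    (memo : PySem.Dict Int (List Int)) (x : Int)
    (hInv : pvInvA (fun z => pm.get? z) F memo)
    (hterm : pvTermF (fun z => pm.get? z) F (some x) = true) :
    (pvGetPath pm F memo x).1 = pvPath (fun z => pm.get? z) F x ∧
    pvInvA (fun z => pm.get? z) F (pvGetPath pm F memo x).2  := by
  cases hmx : memo.get? x with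
  | some p =>
    have hp := hInv x p hmx
    constructor
    · simp only [pvGetPath, hmx, hp.2]
    · simpa only [pvGetPath, hmx] using hInv
  | none =>
    obtain ⟨s, cur', hcl, hch, hterms, hbase⟩ :=
      pvClimb_spec pm memo F hInv F (some x) [] (Nat.le_refl F) hterm
    simp only [List.nil_append] at hcl
    obtain ⟨t, rfl⟩ : ∃ t, s = x :: t := by
      cases hch with
      | nil =>
        exfalso
        simp only at hbase
        rw [hmx] at hbase
        simp at hbase
      | cons _ t _ _ => exact ⟨t, rfl⟩
    obtain ⟨w1, w2, w3⟩ :=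
      pvWriteback_spec pm F hF (x :: t) (some x) cur' memo hch hterms hInv
    simp only [pvPathO] at w1 w2 w3
    cases cur' with
    | none =>
      simp only [pvGetPath, hmx, hcl]
      exact ⟨PySem.Dict.getD_of_get?_eq_some _ [] (w3 x (by simp)), w2⟩
    | some c =>
      simp only at hbase
      have hcont : memo.contains c = true := by
        rw [PySem.Dict.contains_eq_isSome_get?, hbase]
        rfl
      have hgd : memo.getD c [] = pvPath (fun z => pm.get? z) F c :=
        PySem.Dict.getD_of_get?_eq_some memo [] hbase
      simp only [pvGetPath, hmx, hcl, hcont, if_true, hgd]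
      exact ⟨PySem.Dict.getD_of_get?_eq_some _ [] (w3 x (by simp)), w2⟩

-- the main loop of A accumulates exactly the filter by path inequality
theorem pvLoopA_spec (pm1 pm2 : PySem.Dict Int Int) (F1 F2 : Nat) (hF1 : 0 < F1) (hF2 : 0 < F2) :
    ∀ (ns : List Int) (m1 m2 : PySem.Dict Int (List Int)) (diff : List Int),
    pvInvA (fun z => pm1.get? z) F1 m1 → pvInvA (fun z => pm2.get? z) F2 m2 →
    (∀ n ∈ ns, pvTermF (fun z => pm1.get? z) F1 (some n) = true ∧
               pvTermF (fun z => pm2.get? z) F2 (some n) = true) →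
    (ns.foldl
      (fun (st : PySem.Dict Int (List Int) × PySem.Dict Int (List Int) × List Int) node =>
        let r1 := pvGetPath pm1 F1 st.1 node
        let r2 := pvGetPath pm2 F2 st.2.1 node
        if r1.1 ≠ r2.1 then (r1.2, r2.2, st.2.2 ++ [node]) else (r1.2, r2.2, st.2.2))
      (m1, m2, diff)).2.2
    = diff ++ ns.filter
        (fun n => decide (pvPath (fun z => pm1.get? z) F1 n ≠ pvPath (fun z => pm2.get? z) F2 n)) := by
  intro ns
  induction ns with
  | nil => intro m1 m2 diff _ _ _; simp
  | cons n ns ih =>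
    intro m1 m2 diff hI1 hI2 hterm
    have htn := hterm n (by simp)
    have g1 := pvGetPath_spec pm1 F1 hF1 m1 n hI1 htn.1
    have g2 := pvGetPath_spec pm2 F2 hF2 m2 n hI2 htn.2
    simp only [List.foldl_cons]
    by_cases hne : pvPath (fun z => pm1.get? z) F1 n = pvPath (fun z => pm2.get? z) F2 n
    · rw [if_neg (by simp [g1.1, g2.1, hne])]
      rw [ih _ _ _ g1.2 g2.2 (fun z hz => hterm z (List.mem_cons_of_mem _ hz))]
      simp [hne]
    · rw [if_pos (by simp [g1.1, g2.1, hne])]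
      rw [ih _ _ _ g1.2 g2.2 (fun z hz => hterm z (List.mem_cons_of_mem _ hz))]
      simp [hne]


-- the dict a fold of inserts builds looks up the last matching edge
theorem pvGet_foldl_insert (edges : List (Int × Int)) (d : PySem.Dict Int Int) (x : Int) :
    (edges.foldl (fun d pc => d.insert pc.2 pc.1) d).get? x =
      match edges.reverse.find? (fun pc => pc.2 == x) with
      | some pc => some pc.1
      | none => d.get? x := by
  induction edges generalizing d with
  | nil => simp
  | cons pc rest ih =>
    simp only [List.foldl_cons, List.reverse_cons, List.find?_append]
    rw [ih]
    cases hf : rest.reverse.find? (fun pc => pc.2 == x) with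
    | some q => simp
    | none =>
      simp only [Option.none_or]
      rw [PySem.Dict.get?_insert]
      by_cases hx : pc.2 = x
      · simp [List.find?, hx]
      · have hb : (pc.2 == x) = false := by simp [hx]
        simp only [List.find?, hb]
        rw [if_neg (fun h => hx h.symm)]


theorem pvBuildParent_fst (edges : List (Int × Int)) :
    (pvBuildParent edges).1 = edges.foldl (fun d pc => d.insert pc.2 pc.1) PySem.Dict.empty := by
  have gen : ∀ (es : List (Int × Int)) (d : PySem.Dict Int Int) (sn : PySem.Set Int),
      (es.foldl
        (fun st pc =>
          (st.1.insert pc.2 pc.1, PySem.Set.add (PySem.Set.add st.2 pc.1) pc.2))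
        (d, sn)).1 = es.foldl (fun d pc => d.insert pc.2 pc.1) d := by
    intro es
    induction es with
    | nil => intro d sn; rfl
    | cons pc rest ih => intro d sn; simp only [List.foldl_cons]; exact ih _ _
  exact gen edges PySem.Dict.empty PySem.Set.empty


theorem pvBuildParent_get? (edges : List (Int × Int)) (x : Int) :
    (pvBuildParent edges).1.get? x = pvParent? edges x := by
  rw [pvBuildParent_fst, pvGet_foldl_insert]
  unfold pvParent?
  cases edges.reverse.find? (fun pc => pc.2 == x) <;> simp [PySem.Dict.get?_empty]


theorem pvBuildParent_snd (edges : List (Int × Int)) :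
    (pvBuildParent edges).2 = PySem.Set.ofList (edges.flatMap (fun pc => [pc.1, pc.2])) := by
  have gen : ∀ (es : List (Int × Int)) (d : PySem.Dict Int Int) (sn : PySem.Set Int),
      (es.foldl
        (fun st pc =>
          (st.1.insert pc.2 pc.1, PySem.Set.add (PySem.Set.add st.2 pc.1) pc.2))
        (d, sn)).2 = (es.flatMap (fun pc => [pc.1, pc.2])).foldl PySem.Set.add sn := by
    intro es
    induction es with
    | nil => intro d sn; rfl
    | cons pc rest ih =>
      intro d sn
      simp only [List.foldl_cons, List.flatMap_cons, List.foldl_append]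
      exact ih _ _
  unfold pvBuildParent
  rw [gen, PySem.Set.ofList_eq_foldl]
  rfl



-- ---------- B-side ----------

theorem pvChildren_getD (p1 : PySem.Dict Int Int) (y : Int) :
    (pvChildren p1).getD y [] = (p1.items.filter (fun cp => cp.2 == y)).map (·.1) := by
  unfold pvChildren
  rw [show (p1.items.foldl (fun d cp => d.modify cp.2 [] (· ++ [cp.1])) PySem.Dict.empty)
      = ((p1.items.map Prod.swap).foldl (fun d p => d.modify p.1 [] (· ++ [p.2]))
          PySem.Dict.empty) from by rw [List.foldl_map]; rfl]
  rw [PySem.Dict.getD_foldl_modify_append]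
  simp [List.filter_map, List.map_map, Function.comp_def]


theorem pvMemChildren (p1 : PySem.Dict Int Int) (hnd : p1.keys.Nodup) (c y : Int) :
    c ∈ (pvChildren p1).getD y [] ↔ p1.get? c = some y := by
  rw [pvChildren_getD]
  simp only [List.mem_map, List.mem_filter]
  constructor
  · rintro ⟨cp, ⟨hmem, hyeq⟩, rfl⟩
    have : cp.2 = y := by simpa using hyeq
    have hcp : (cp.1, y) ∈ p1.items := by
      rw [← this]
      exact hmem
    exact PySem.Dict.get?_of_mem_items p1 hcp hnd
  · intro h
    exact ⟨(c, y), ⟨PySem.Dict.mem_items_of_get?_eq_some p1 h, by simp⟩, rfl⟩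


theorem pvAltP_eq (o : List (Int × Int)) :
    PySem.Dict.ofList (o.map (fun pc => (pc.2, pc.1))) = (pvBuildParent o).1 := by
  rw [pvBuildParent_fst]
  rw [show PySem.Dict.ofList (o.map (fun pc => (pc.2, pc.1)))
      = (o.map (fun pc => (pc.2, pc.1))).foldl (fun d p => d.insert p.1 p.2) PySem.Dict.empty
      from rfl, List.foldl_map]


theorem pvP1_keys_nodup (o : List (Int × Int)) : ((pvBuildParent o).1).keys.Nodup := by
  rw [pvBuildParent_fst]
  exact PySem.Dict.nodup_keys_foldl_insert_key o (fun pc => pc.2) (fun d pc => pc.1) _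
    PySem.Dict.nodup_keys_empty


theorem pvParent_mem (o : List (Int × Int)) (x a : Int) (h : pvParent? o x = some a) :
    ∃ pc ∈ o, pc.1 = a ∧ pc.2 = x := by
  unfold pvParent? at h
  rw [Option.map_eq_some_iff] at h
  obtain ⟨pc, hfind, rfl⟩ := h
  refine ⟨pc, List.mem_reverse.mp (List.mem_of_find?_eq_some hfind), rfl, ?_⟩
  simpa using List.find?_some hfind


theorem pvInner (cs pend bad : List Int) :
    ∃ newl : List Int,
      (cs.foldl
        (fun (st : List Int × PySem.Set Int) c =>
          if PySem.Set.contains st.2 c then st else (st.1 ++ [c], PySem.Set.add st.2 c))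
        (pend, bad)).1 = pend ++ newl ∧
      (cs.foldl
        (fun (st : List Int × PySem.Set Int) c =>
          if PySem.Set.contains st.2 c then st else (st.1 ++ [c], PySem.Set.add st.2 c))
        (pend, bad)).2 = bad ++ newl ∧
      (∀ z ∈ newl, z ∈ cs) ∧
      (∀ z, z ∈ bad ∨ z ∈ cs → z ∈ bad ++ newl) ∧
      (bad.Nodup → (bad ++ newl).Nodup) := by
  induction cs generalizing pend bad with
  | nil => exact ⟨[], by simp, by simp, by simp, by simp, fun h => by simpa using h⟩
  | cons a cs ih =>
    simp only [List.foldl_cons]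
    by_cases ha : a ∈ bad
    · rw [if_pos (by rwa [PySem.Set.contains_iff])]
      obtain ⟨newl, h1, h2, h3, h4, h5⟩ := ih pend bad
      refine ⟨newl, h1, h2, fun z hz => List.mem_cons_of_mem _ (h3 z hz), ?_, h5⟩
      · intro z hz
        rcases hz with hz | hz
        · exact h4 z (Or.inl hz)
        · rcases List.mem_cons.mp hz with rfl | hz
          · exact h4 z (Or.inl ha)
          · exact h4 z (Or.inr hz)
    · rw [if_neg (by rw [PySem.Set.contains_iff]; exact fun h => ha h)]
      rw [PySem.Set.add_of_not_mem ha]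
      obtain ⟨newl, h1, h2, h3, h4, h5⟩ := ih (pend ++ [a]) (bad ++ [a])
      refine ⟨a :: newl, by simpa using h1, by simpa using h2, ?_, ?_, ?_⟩
      · intro z hz
        rcases List.mem_cons.mp hz with rfl | hz
        · exact List.mem_cons_self
        · exact List.mem_cons_of_mem _ (h3 z hz)
      · intro z hz
        have : z ∈ (bad ++ [a]) ++ newl := by
          rcases hz with hz | hz
          · exact h4 z (Or.inl (by simp [hz]))
          · rcases List.mem_cons.mp hz with rfl | hz
            · exact h4 z (Or.inl (by simp))
            · exact h4 z (Or.inr hz)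
        simpa using this
      · intro hnd
        have : ((bad ++ [a]) ++ newl).Nodup := h5 (by
          rw [List.nodup_append]
          refine ⟨hnd, by simp, fun x hx y hy => ?_⟩
          rcases List.mem_singleton.mp hy with rfl
          exact fun hxy => ha (hxy ▸ hx))
        simpa using this


theorem pvBFS_spec (children : PySem.Dict Int (List Int)) (U : List Int) (Q : Int → Prop)
    (hCH : ∀ y c, c ∈ children.getD y [] → c ∈ U)
    (hQstep : ∀ y c, Q y → c ∈ children.getD y [] → Q c) :
    ∀ (f : Nat) (pend bad : List Int),
    bad.Nodup → (∀ z ∈ pend, z ∈ bad) → (∀ z ∈ bad, z ∈ U) → (∀ z ∈ bad, Q z) →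
    (∀ y ∈ bad, y ∈ pend ∨ ∀ c ∈ children.getD y [], c ∈ bad) →
    pend.length + U.length + 1 ≤ f + bad.length →
    (∀ z ∈ bad, z ∈ pvBFS children f pend bad) ∧
    (pvBFS children f pend bad).Nodup ∧
    (∀ z ∈ pvBFS children f pend bad, z ∈ U) ∧
    (∀ z ∈ pvBFS children f pend bad, Q z) ∧
    (∀ y ∈ pvBFS children f pend bad, ∀ c ∈ children.getD y [], c ∈ pvBFS children f pend bad) := by
  intro f
  induction f with
  | zero =>
    intro pend bad hnd hps hbU _ _ hlen
    have : bad.length ≤ U.length := ((hnd.subperm hbU).length_le)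
    omega
  | succ f ih =>
    intro pend bad hnd hps hbU hbQ hcl hlen
    cases pend with
    | nil =>
      simp only [pvBFS]
      refine ⟨fun z hz => hz, hnd, hbU, hbQ, fun y hy c hc => ?_⟩
      rcases hcl y hy with h | h
      · exact absurd h (List.not_mem_nil)
      · exact h c hc
    | cons y pend' =>
      have hybad : y ∈ bad := hps y (by simp)
      obtain ⟨newl, h1, h2, h3, h4, h5⟩ := pvInner (children.getD y []) pend' bad
      have hstep :
          pvBFS children (f + 1) (y :: pend') bad
            = pvBFS children f (pend' ++ newl) (bad ++ newl) := by
        simp only [pvBFS, h1, h2]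
      rw [hstep]
      have hnewU : ∀ z ∈ newl, z ∈ U := fun z hz => hCH y z (h3 z hz)
      have hnewQ : ∀ z ∈ newl, Q z := fun z hz => hQstep y z (hbQ y hybad) (h3 z hz)
      have res := ih (pend' ++ newl) (bad ++ newl)
        (h5 hnd)
        (by
          intro z hz
          rcases List.mem_append.mp hz with hz | hz
          · exact List.mem_append_left _ (hps z (List.mem_cons_of_mem _ hz))
          · exact List.mem_append_right _ hz)
        (by
          intro z hz
          rcases List.mem_append.mp hz with hz | hz
          · exact hbU z hz
          · exact hnewU z hz)
        (by
          intro z hz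
          rcases List.mem_append.mp hz with hz | hz
          · exact hbQ z hz
          · exact hnewQ z hz)
        (by
          intro y' hy'
          rcases List.mem_append.mp hy' with hy' | hy'
          · rcases hcl y' hy' with hp | hcb
            · rcases List.mem_cons.mp hp with rfl | hp
              · exact Or.inr (fun cc hcc => h4 cc (Or.inr hcc))
              · exact Or.inl (List.mem_append_left _ hp)
            · exact Or.inr (fun cc hcc => List.mem_append_left _ (hcb cc hcc))
          · exact Or.inl (List.mem_append_right _ hy'))
        (by
          simp only [List.length_append, List.length_cons] at hlen ⊢
          omega)
      obtain ⟨r1, r2, r3, r4, r5⟩ := res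
      exact ⟨fun z hz => r1 z (List.mem_append_left _ hz), r2, r3, r4, r5⟩


theorem pvComplete (children : PySem.Dict Int (List Int)) (P1 P2 : Int → Option Int)
    (F1 F2 : Nat) (hF1 : 0 < F1) (hF2 : 0 < F2) (U R bad0 : List Int)
    (hterm12 : ∀ x ∈ U, pvTermF P1 F1 (some x) = true ∧ pvTermF P2 F2 (some x) = true)
    (hbad0 : ∀ z, z ∈ U → P1 z ≠ P2 z → z ∈ bad0)
    (hbad0R : ∀ z ∈ bad0, z ∈ R)
    (hclosed : ∀ y ∈ R, ∀ c ∈ children.getD y [], c ∈ R)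
    (hchar : ∀ x a, P1 x = some a → x ∈ children.getD a [])
    (hUparent : ∀ x a, P1 x = some a → a ∈ U) :
    ∀ (n : Nat) (x : Int), pvTermF P1 n (some x) = true → x ∈ U →
      pvPath P1 F1 x ≠ pvPath P2 F2 x → x ∈ R := by
  intro n
  induction n with
  | zero => intro x h; simp [pvTermF] at h
  | succ n ih =>
    intro x hterm hxU hbad
    simp only [pvTermF] at hterm
    by_cases hp : P1 x = P2 x
    · cases hx1 : P1 x with
      | none =>
        exfalso
        apply hbad
        rw [pvPath_eq_iff P1 P2 F1 F2 hF1 hF2 x (hterm12 x hxU).1 (hterm12 x hxU).2]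
        exact ⟨hp, fun a ha => absurd (hx1 ▸ ha) (by simp)⟩
      | some a =>
        have hbada : pvPath P1 F1 a ≠ pvPath P2 F2 a := by
          intro h
          apply hbad
          rw [pvPath_eq_iff P1 P2 F1 F2 hF1 hF2 x (hterm12 x hxU).1 (hterm12 x hxU).2]
          refine ⟨hp, fun a' ha' => ?_⟩
          rw [hx1] at ha'
          cases ha'
          exact h
        have haU : a ∈ U := hUparent x a hx1
        have hterma : pvTermF P1 n (some a) = true := by rwa [hx1] at hterm
        have haR := ih a hterma haU hbada
        exact hclosed a haR x (hchar x a hx1)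
    · exact hbad0R x (hbad0 x hxU hp)


-- ===== VERDICT (by name: the statement is the Claim_ definition above) =====
theorem solution_spec : Claim_equal_solution := by
  unfold Claim_equal_solution
  intro o c _ hpre
  unfold Spec_solution
  -- abbreviations
  have hfun1 : (fun z => (pvBuildParent o).1.get? z) = pvParent? o := funext (pvBuildParent_get? o)
  have hfun2 : (fun z => (pvBuildParent c).1.get? z) = pvParent? c := funext (pvBuildParent_get? c)
  have hF1 : 0 < o.length + 1 := Nat.succ_pos _
  have hF2 : 0 < c.length + 1 := Nat.succ_pos _
  have hmem_allN : ∀ z, z ∈ PySem.Set.union (pvBuildParent o).2 (pvBuildParent c).2 ↔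
      z ∈ pvNodes o c := by
    intro z
    rw [pvBuildParent_snd, pvBuildParent_snd, PySem.Set.mem_union,
      PySem.Set.mem_ofList, PySem.Set.mem_ofList]
    unfold pvNodes
    simp [List.mem_flatMap]
  have hnodesB : ∀ z, z ∈ PySem.Set.ofList ((o ++ c).flatMap (fun pc => [pc.1, pc.2])) ↔
      z ∈ pvNodes o c := by
    intro z
    rw [PySem.Set.mem_ofList]
    rfl
  have hInvE : ∀ (P : Int → Option Int) (F : Nat),
      pvInvA P F (PySem.Dict.empty : PySem.Dict Int (List Int)) := by
    intro P F k v h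
    rw [PySem.Dict.get?_empty] at h
    exact absurd h (by simp)
  -- ===== A reduces to a filter over the node set =====
  have hloop := pvLoopA_spec (pvBuildParent o).1 (pvBuildParent c).1 (o.length + 1)
    (c.length + 1) hF1 hF2
    (PySem.Set.union (pvBuildParent o).2 (pvBuildParent c).2)
    PySem.Dict.empty PySem.Dict.empty []
    (hInvE _ _) (hInvE _ _)
    (by
      intro n hn
      have := hpre n ((hmem_allN n).mp hn)
      rw [hfun1, hfun2]
      exact this)
  rw [hfun1, hfun2] at hloop
  have hA : solution o c
      = PySem.List.sorted
          ((PySem.Set.union (pvBuildParent o).2 (pvBuildParent c).2).filter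
            (fun n => decide (pvPath (pvParent? o) (o.length + 1) n
              ≠ pvPath (pvParent? c) (c.length + 1) n)))
          (fun x => x) false := by
    simp only [solution]
    rw [hloop]
    simp
  -- ===== B reduces to the BFS closure =====
  have hchar : ∀ x a : Int, pvParent? o x = some a →
      x ∈ (pvChildren (pvBuildParent o).1).getD a [] := by
    intro x a hx
    rw [pvMemChildren _ (pvP1_keys_nodup o), pvBuildParent_get?]
    exact hx
  have hchar' : ∀ x a : Int, x ∈ (pvChildren (pvBuildParent o).1).getD a [] →
      pvParent? o x = some a := by
    intro x a hx
    rw [pvMemChildren _ (pvP1_keys_nodup o), pvBuildParent_get?] at hx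
    exact hx
  have hparent_nodes : ∀ x a : Int, pvParent? o x = some a →
      a ∈ pvNodes o c ∧ x ∈ pvNodes o c := by
    intro x a hx
    obtain ⟨pc, hpc, rfl, rfl⟩ := pvParent_mem o x a hx
    constructor <;>
      · unfold pvNodes
        rw [List.mem_flatMap]
        exact ⟨pc, List.mem_append_left _ hpc, by simp⟩
  set nodesB : PySem.Set Int :=
    PySem.Set.ofList ((o ++ c).flatMap (fun pc => [pc.1, pc.2])) with hnodesBdef
  set bad0 : PySem.Set Int :=
    nodesB.filter (fun x => decide ((pvBuildParent o).1.get? x ≠ (pvBuildParent c).1.get? x))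
    with hbad0def
  have hmem_bad0 : ∀ z, z ∈ bad0 ↔
      z ∈ pvNodes o c ∧ pvParent? o z ≠ pvParent? c z := by
    intro z
    rw [hbad0def, List.mem_filter, decide_eq_true_eq, pvBuildParent_get?, pvBuildParent_get?,
      hnodesB]
  have hQ := pvBFS_spec (pvChildren (pvBuildParent o).1) nodesB
    (fun z => z ∈ pvNodes o c ∧ pvPath (pvParent? o) (o.length + 1) z
        ≠ pvPath (pvParent? c) (c.length + 1) z)
    (by
      intro y cc hcc
      have hpc := hchar' cc y hcc
      rw [hnodesB]
      exact (hparent_nodes cc y hpc).2)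
    (by
      intro y cc hQy hcc
      have hpc := hchar' cc y hcc
      have hccN : cc ∈ pvNodes o c := (hparent_nodes cc y hpc).2
      refine ⟨hccN, ?_⟩
      intro heq
      rw [pvPath_eq_iff (pvParent? o) (pvParent? c) (o.length + 1) (c.length + 1) hF1 hF2
        cc (hpre cc hccN).1 (hpre cc hccN).2] at heq
      obtain ⟨hpeq, hrec⟩ := heq
      exact hQy.2 (hrec y hpc))
    (nodesB.length + 1) bad0 bad0
    (List.Nodup.filter _ (PySem.Set.nodup_ofList _))
    (fun z hz => hz)
    (fun z hz => List.mem_of_mem_filter hz)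
    (by
      intro z hz
      rw [hmem_bad0] at hz
      refine ⟨hz.1, ?_⟩
      intro heq
      rw [pvPath_eq_iff (pvParent? o) (pvParent? c) (o.length + 1) (c.length + 1) hF1 hF2
        z (hpre z hz.1).1 (hpre z hz.1).2] at heq
      exact hz.2 heq.1)
    (fun y hy => Or.inl hy)
    (by omega)
  obtain ⟨hb0R, hRnd, hRU, hRQ, hRcl⟩ := hQ
  set R := pvBFS (pvChildren (pvBuildParent o).1) (nodesB.length + 1) bad0 bad0 with hRdef
  have hB : solution_alt o c = PySem.List.sorted R (fun x => x) false := by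
    simp only [solution_alt, pvAltP_eq]
    rfl
  -- ===== the two underlying lists are permutations =====
  have hcompl := pvComplete (pvChildren (pvBuildParent o).1) (pvParent? o) (pvParent? c)
    (o.length + 1) (c.length + 1) hF1 hF2 nodesB R bad0
    (fun x hx => hpre x ((hnodesB x).mp hx))
    (by
      intro z hzU hzne
      rw [hmem_bad0]
      exact ⟨(hnodesB z).mp hzU, hzne⟩)
    hb0R hRcl hchar
    (fun x a hx => (hnodesB a).mpr (hparent_nodes x a hx).1)
  have hiff : ∀ z,
      z ∈ (PySem.Set.union (pvBuildParent o).2 (pvBuildParent c).2).filter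
            (fun n => decide (pvPath (pvParent? o) (o.length + 1) n
              ≠ pvPath (pvParent? c) (c.length + 1) n)) ↔ z ∈ R := by
    intro z
    rw [List.mem_filter, decide_eq_true_eq, hmem_allN]
    constructor
    · rintro ⟨hzN, hzB⟩
      exact hcompl (o.length + 1) z (hpre z hzN).1 ((hnodesB z).mpr hzN) hzB
    · intro hzR
      exact ⟨(hRQ z hzR).1, (hRQ z hzR).2⟩
  have hperm :
      ((PySem.Set.union (pvBuildParent o).2 (pvBuildParent c).2).filter
        (fun n => decide (pvPath (pvParent? o) (o.length + 1) n
          ≠ pvPath (pvParent? c) (c.length + 1) n))).Perm R := by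
    have hndAll : ((pvBuildParent o).2.union (pvBuildParent c).2).Nodup := by
      rw [pvBuildParent_snd]
      exact PySem.Set.nodup_union _ _ (PySem.Set.nodup_ofList _)
    rw [List.perm_ext_iff_of_nodup (List.Nodup.filter _ hndAll) hRnd]
    exact hiff
  rw [hA, hB]
  exact PySem.List.sorted_eq_sorted_of_perm _ _ _ (fun a b h => h) hperm
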